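-- pv_equiv track=rewrite | github.com/rubnawazkhan290601/DSA-ASSIGNMENT | problem1.py | max_cyclic_substring_sum
-- ===== SOURCE A (Python) =====
-- def max_cyclic_substring_sum(s):
--     n = len(s)
--     doubled = s + s
--
--     left = 0
--     current_sum = 0
--     max_sum = 0
--
--     char_index = {}
--
--     for right in range(len(doubled)):
--         ch = doubled[right]
--         value = ord(ch) - ord('a') + 1
--
--         # If duplicate character exists in current window
--         while ch in char_index and char_index[ch] >= left:
--             remove_char = doubled[left]
--             current_sum -= ord(remove_char) - ord('a') + 1
--             left += 1
--
--         # Window size should not exceed original string length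
--         while right - left + 1 > n:
--             remove_char = doubled[left]
--             current_sum -= ord(remove_char) - ord('a') + 1
--             left += 1
--
--         current_sum += value
--         char_index[ch] = right
--
--         max_sum = max(max_sum, current_sum)
--
--     return max_sum
-- ===== SOURCE B (Python) =====
-- def max_cyclic_substring_sum(s):
--     n = len(s)
--     doubled = s + s
--     best = 0
--     for r in range(len(doubled)):
--         seen = set()
--         total = 0
--         j = r
--         while j >= 0 and r - j + 1 <= n and doubled[j] not in seen:
--             seen.add(doubled[j])
--             total += ord(doubled[j]) - ord('a') + 1
--             j -= 1
--         best = max(best, total)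
--     return best
-- ===== Notes on version B (the rewrite author's own statement) =====
-- stated objective: alternative
-- what changed: Replaced the incremental sliding window (two left-advancing while loops, a running sum and a last-occurrence dict threaded across iterations) by a stateless per-end backward rescan: for each end index r in the doubled string, a fresh scan walks left from r with a set while characters stay distinct and the window is at most n long, summing values; the maximum of these per-end sums is the answer.
import Mathlib
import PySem

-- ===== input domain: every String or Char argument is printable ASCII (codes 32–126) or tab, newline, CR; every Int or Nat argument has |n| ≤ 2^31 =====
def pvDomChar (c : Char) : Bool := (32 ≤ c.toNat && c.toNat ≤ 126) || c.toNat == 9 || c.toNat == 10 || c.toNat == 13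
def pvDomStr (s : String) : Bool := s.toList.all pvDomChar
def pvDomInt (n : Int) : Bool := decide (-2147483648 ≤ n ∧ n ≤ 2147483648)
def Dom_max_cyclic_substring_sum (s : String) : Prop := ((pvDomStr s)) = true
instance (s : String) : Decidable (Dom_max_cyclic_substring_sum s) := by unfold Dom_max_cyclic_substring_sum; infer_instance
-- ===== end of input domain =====

-- B replaces A's incremental sliding window (two advancing while loops, a running sum and a
-- last-occurrence dict carried across iterations) by a stateless backward rescan from each end
-- index of the doubled string (objective: alternative decomposition, not faster).

-- ===== PORT A =====

-- ord(ch) - ord('a') + 1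
def pvVal (c : Char) : Int := (c.toNat : Int) - 97 + 1

-- while ch in char_index and char_index[ch] >= left: current_sum -= val(doubled[left]); left += 1
-- (fuel only makes the loop total; it is always sufficient at the call site)
def pvDupLoop (d : List Char) (ch : Char) (idx : PySem.Dict Char Nat) :
    Nat → Nat → Int → Nat × Int
  | 0, left, cur => (left, cur)
  | fuel+1, left, cur =>
    match idx.get? ch with
    | some i =>
      if left ≤ i then
        pvDupLoop d ch idx fuel (left+1) (cur - pvVal (d.getD left ' '))
      else (left, cur)
    | none => (left, cur)

-- while right - left + 1 > n: current_sum -= val(doubled[left]); left += 1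
def pvLenLoop (d : List Char) (n r : Nat) : Nat → Nat → Int → Nat × Int
  | 0, left, cur => (left, cur)
  | fuel+1, left, cur =>
    if n < r - left + 1 then
      pvLenLoop d n r fuel (left+1) (cur - pvVal (d.getD left ' '))
    else (left, cur)

-- one iteration of A's for-loop; state = (left, current_sum, max_sum, char_index)
def pvStepA (d : List Char) (n : Nat)
    (st : Nat × Int × Int × PySem.Dict Char Nat) (r : Nat) :
    Nat × Int × Int × PySem.Dict Char Nat :=
  match st with
  | (left, cur, maxs, idx) =>
    let ch := d.getD r ' '
    let v := pvVal ch
    let p1 := pvDupLoop d ch idx (d.length + 1) left cur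
    let p2 := pvLenLoop d n r (d.length + 1) p1.1 p1.2
    let cur' := p2.2 + v
    (p2.1, cur', max maxs cur', idx.insert ch r)

def max_cyclic_substring_sum (s : String) : Int :=
  let n := s.toList.length
  let d := s.toList ++ s.toList
  ((List.range d.length).foldl (pvStepA d n) (0, 0, 0, PySem.Dict.empty)).2.2.1

-- ===== PORT B =====

-- while j >= 0 and r - j + 1 <= n and doubled[j] not in seen: add, sum, j -= 1
def pvBScan (d : List Char) (n r : Nat) (j : Nat) (seen : PySem.Set Char) (tot : Int) : Int :=
  if r - j + 1 ≤ n ∧ d.getD j ' ' ∉ seen then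
    let tot' := tot + pvVal (d.getD j ' ')
    match j with
    | 0 => tot'
    | j' + 1 => pvBScan d n r j' (PySem.Set.add seen (d.getD j ' ')) tot'
  else tot

def max_cyclic_substring_sum_alt (s : String) : Int :=
  let n := s.toList.length
  let d := s.toList ++ s.toList
  (List.range d.length).foldl
    (fun best r => max best (pvBScan d n r r PySem.Set.empty 0)) 0

-- ===== PRECONDITION & SPEC =====
def Spec_max_cyclic_substring_sum (s : String) (out : Int) : Prop := out = max_cyclic_substring_sum_alt s
instance (s : String) (out : Int) : Decidable (Spec_max_cyclic_substring_sum s out) := by unfold Spec_max_cyclic_substring_sum; infer_instance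

-- ===== CLAIM (what is proved, stated in full; the proofs are below) =====
def Claim_equal_max_cyclic_substring_sum : Prop := ∀ (s : String), Dom_max_cyclic_substring_sum s → Spec_max_cyclic_substring_sum s (max_cyclic_substring_sum s)

-- ===== LEMMAS AND PROOFS =====

-- the window d[l..r] (as characters, via total indexing)
def pvSeg (d : List Char) (l r : Nat) : List Char :=
  (List.range' l (r + 1 - l)).map (fun i => d.getD i ' ')

-- sum of values over the window d[l..r]
def pvWsum (d : List Char) (l r : Nat) : Int := ((pvSeg d l r).map pvVal).sum

-- the window d[l..r] is admissible: length ≤ n and all characters distinct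
def pvValidB (d : List Char) (n r l : Nat) : Bool :=
  decide (r + 1 - l ≤ n) && decide (pvSeg d l r).Nodup

lemma pvValidB_top (d : List Char) (n r : Nat) : pvValidB d n r (r + 1) = true := by
  simp [pvValidB, pvSeg]

-- minimal admissible left end for the window ending at r
def pvMv (d : List Char) (n r : Nat) : Nat :=
  Nat.find (p := fun l => pvValidB d n r l = true) ⟨r + 1, pvValidB_top d n r⟩

-- last occurrence of c among indices < k (mirrors A's char_index after k steps)
def pvLo (d : List Char) : Nat → Char → Option Nat
  | 0, _ => none
  | k+1, c => if d.getD k ' ' = c then some k else pvLo d k c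

-- running maximum after k steps
def pvM (d : List Char) (n : Nat) : Nat → Int
  | 0 => 0
  | k+1 => max (pvM d n k) (pvWsum d (pvMv d n k) k)

-- A's loop invariant after k iterations
def pvInv (d : List Char) (n k : Nat) (st : Nat × Int × Int × PySem.Dict Char Nat) : Prop :=
  (∀ c, st.2.2.2.get? c = pvLo d k c) ∧ st.2.2.1 = pvM d n k ∧
  (match k with
   | 0 => st.1 = 0 ∧ st.2.1 = 0
   | k'+1 => st.1 = pvMv d n k' ∧ st.2.1 = pvWsum d (pvMv d n k') k')


lemma pvSeg_empty (d : List Char) (r : Nat) : pvSeg d (r + 1) r = [] := by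
  simp [pvSeg]

lemma pvSeg_cons (d : List Char) {l r : Nat} (h : l ≤ r) :
    pvSeg d l r = d.getD l ' ' :: pvSeg d (l + 1) r := by
  unfold pvSeg
  have h1 : r + 1 - l = (r + 1 - (l + 1)) + 1 := by omega
  rw [h1, List.range'_succ, List.map_cons]

lemma pvSeg_snoc (d : List Char) {l r : Nat} (h : l ≤ r + 1) :
    pvSeg d l (r + 1) = pvSeg d l r ++ [d.getD (r + 1) ' '] := by
  unfold pvSeg
  have h1 : r + 2 - l = (r + 1 - l) + 1 := by omega
  rw [h1, List.range'_concat, List.map_append]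
  have h2 : l + 1 * (r + 1 - l) = r + 1 := by omega
  rw [h2, List.map_singleton]

lemma pvSeg_mem {d : List Char} {l r : Nat} {c : Char} (h : l ≤ r + 1) :
    c ∈ pvSeg d l r ↔ ∃ i, l ≤ i ∧ i ≤ r ∧ d.getD i ' ' = c := by
  unfold pvSeg
  simp only [List.mem_map, List.mem_range'_1]
  constructor
  · rintro ⟨i, ⟨hi1, hi2⟩, hi3⟩; exact ⟨i, hi1, by omega, hi3⟩
  · rintro ⟨i, hi1, hi2, hi3⟩; exact ⟨i, ⟨hi1, by omega⟩, hi3⟩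

lemma pvWsum_empty (d : List Char) (r : Nat) : pvWsum d (r + 1) r = 0 := by
  simp [pvWsum, pvSeg_empty]

lemma pvWsum_cons (d : List Char) {l r : Nat} (h : l ≤ r) :
    pvWsum d l r = pvVal (d.getD l ' ') + pvWsum d (l + 1) r := by
  simp [pvWsum, pvSeg_cons d h]

lemma pvWsum_snoc (d : List Char) {l r : Nat} (h : l ≤ r + 1) :
    pvWsum d l (r + 1) = pvWsum d l r + pvVal (d.getD (r + 1) ' ') := by
  simp [pvWsum, pvSeg_snoc d h]

lemma pvValidB_iff {d : List Char} {n r l : Nat} :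
    pvValidB d n r l = true ↔ (r + 1 - l ≤ n ∧ (pvSeg d l r).Nodup) := by
  simp [pvValidB]

lemma pvValidB_mono {d : List Char} {n r l l' : Nat} (h : pvValidB d n r l = true)
    (hll : l ≤ l') (hl' : l' ≤ r + 1) : pvValidB d n r l' = true := by
  rw [pvValidB_iff] at h ⊢
  refine ⟨by omega, ?_⟩
  have hsplit : pvSeg d l r =
      ((List.range' l (l' - l)).map (fun i => d.getD i ' ')) ++ pvSeg d l' r := by
    unfold pvSeg
    rw [← List.map_append]
    have : List.range' l (l' - l) ++ List.range' (l + 1 * (l' - l)) (r + 1 - l') =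
        List.range' l ((l' - l) + (r + 1 - l')) := List.range'_append
    have h2 : l + 1 * (l' - l) = l' := by omega
    have h3 : (l' - l) + (r + 1 - l') = r + 1 - l := by omega
    rw [h2, h3] at this
    rw [this]
  rw [hsplit] at h
  exact h.2.of_append_right

lemma pvMv_valid (d : List Char) (n r : Nat) : pvValidB d n r (pvMv d n r) = true :=
  Nat.find_spec (p := fun l => pvValidB d n r l = true) ⟨r + 1, pvValidB_top d n r⟩

lemma pvMv_le {d : List Char} {n r l : Nat} (h : pvValidB d n r l = true) :
    pvMv d n r ≤ l :=
  Nat.find_min' (p := fun l => pvValidB d n r l = true) ⟨r + 1, pvValidB_top d n r⟩ h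

lemma pvMv_min {d : List Char} {n r l : Nat} (h : l < pvMv d n r) :
    ¬ pvValidB d n r l = true :=
  Nat.find_min (p := fun l => pvValidB d n r l = true) ⟨r + 1, pvValidB_top d n r⟩ h

lemma pvMv_le_top (d : List Char) (n r : Nat) : pvMv d n r ≤ r + 1 :=
  pvMv_le (pvValidB_top d n r)

lemma pvMv_eq {d : List Char} {n r l : Nat} (h1 : pvValidB d n r l = true)
    (h2 : l = 0 ∨ pvValidB d n r (l - 1) = false) (hl : l ≤ r + 1) :
    pvMv d n r = l := by
  refine le_antisymm (pvMv_le h1) ?_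
  by_contra hlt
  rcases h2 with h0 | hbad
  · omega
  · have hl1 : pvMv d n r ≤ l - 1 := by omega
    have := pvValidB_mono (pvMv_valid d n r) hl1 (by omega)
    rw [this] at hbad
    exact absurd hbad (by simp)

lemma pvLo_some {d : List Char} {k : Nat} {c : Char} {i : Nat} (h : pvLo d k c = some i) :
    i < k ∧ d.getD i ' ' = c ∧ ∀ j, i < j → j < k → d.getD j ' ' ≠ c := by
  induction k with
  | zero => simp [pvLo] at h
  | succ k ih =>
    rw [pvLo] at h
    split at h
    · rename_i heq
      cases h
      exact ⟨by omega, heq, fun j hj1 hj2 => by omega⟩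
    · rename_i hne
      obtain ⟨h1, h2, h3⟩ := ih h
      refine ⟨by omega, h2, fun j hj1 hj2 => ?_⟩
      rcases Nat.lt_or_ge j k with hjk | hjk
      · exact h3 j hj1 hjk
      · have : j = k := by omega
        subst this; exact hne
    
lemma pvLo_none {d : List Char} {k : Nat} {c : Char} (h : pvLo d k c = none) :
    ∀ j, j < k → d.getD j ' ' ≠ c := by
  induction k with
  | zero => intro j hj; omega
  | succ k ih =>
    rw [pvLo] at h
    split at h
    · cases h
    · rename_i hne
      intro j hj
      rcases Nat.lt_or_ge j k with hjk | hjk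
      · exact ih h j hjk
      · have : j = k := by omega
        subst this; exact hne

lemma pvDupLoop_none {d : List Char} {ch : Char} {idx : PySem.Dict Char Nat}
    (h : idx.get? ch = none) (fuel left : Nat) (cur : Int) :
    pvDupLoop d ch idx fuel left cur = (left, cur) := by
  cases fuel <;> simp [pvDupLoop, h]

lemma pvDupLoop_some {d : List Char} {ch : Char} {idx : PySem.Dict Char Nat} {i e : Nat}
    (h : idx.get? ch = some i) (hie : i ≤ e) :
    ∀ fuel left, i + 1 ≤ left + fuel →
      pvDupLoop d ch idx fuel left (pvWsum d left e) =
        (max left (i + 1), pvWsum d (max left (i + 1)) e) := by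
  intro fuel
  induction fuel with
  | zero =>
    intro left hf
    rw [Nat.max_eq_left (by omega)]
    rfl
  | succ fuel ih =>
    intro left hf
    simp only [pvDupLoop, h]
    split
    · rename_i hle
      have hstep : pvWsum d left e - pvVal (d.getD left ' ') = pvWsum d (left + 1) e := by
        rw [pvWsum_cons d (by omega : left ≤ e)]; ring
      rw [hstep, ih (left + 1) (by omega)]
      rw [Nat.max_eq_right (by omega : left + 1 ≤ i + 1), Nat.max_eq_right (by omega : left ≤ i + 1)]
    · rename_i hgt
      rw [Nat.max_eq_left (by omega)]

lemma pvLenLoop_spec {d : List Char} {n r e : Nat} (hn : 1 ≤ n) (he : e + 1 = r) :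
    ∀ fuel left, left ≤ r → r ≤ left + fuel →
      pvLenLoop d n r fuel left (pvWsum d left e) =
        (max left (r + 1 - n), pvWsum d (max left (r + 1 - n)) e) := by
  intro fuel
  induction fuel with
  | zero =>
    intro left h1 h2
    rw [Nat.max_eq_left (by omega)]
    rfl
  | succ fuel ih =>
    intro left h1 h2
    rw [pvLenLoop]
    split
    · rename_i hcond
      have hlt : left < r := by omega
      have hstep : pvWsum d left e - pvVal (d.getD left ' ') = pvWsum d (left + 1) e := by
        rw [pvWsum_cons d (by omega : left ≤ e)]; ring
      rw [hstep, ih (left + 1) (by omega) (by omega)]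
      rw [Nat.max_eq_right (by omega : left + 1 ≤ r + 1 - n),
        Nat.max_eq_right (by omega : left ≤ r + 1 - n)]
    · rename_i hcond
      rw [Nat.max_eq_left (by omega)]

lemma pvStep_inv {d : List Char} {n : Nat} (hn : 1 ≤ n) {k : Nat}
    {st : Nat × Int × Int × PySem.Dict Char Nat} (hr : k ≤ d.length) (h : pvInv d n k st) :
    pvInv d n (k + 1) (pvStepA d n st k) := by
  obtain ⟨left, cur, maxs, idx⟩ := st
  obtain ⟨hidx, hmax, hlc⟩ := h
  simp only at hidx hmax
  cases k with
  | zero =>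
    obtain ⟨hl0, hc0⟩ := hlc
    simp only at hl0 hc0
    subst hl0 hc0
    have hmv0 : pvMv d n 0 = 0 := by
      apply pvMv_eq _ (Or.inl rfl) (by omega)
      rw [pvValidB_iff]
      refine ⟨by omega, ?_⟩
      rw [pvSeg_cons d (by omega), pvSeg_empty]
      simp
    have hdup : pvDupLoop d (d.getD 0 ' ') idx (d.length + 1) 0 0 = (0, 0) :=
      pvDupLoop_none (by rw [hidx]; rfl) _ _ _
    have hlen : pvLenLoop d n 0 (d.length + 1) 0 0 = (0, 0) := by
      rw [pvLenLoop]
      have : ¬ n < 0 - 0 + 1 := by omega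
      simp [this]
    refine ⟨?_, ?_, ?_, ?_⟩
    · intro c
      simp only [pvStepA, hdup, hlen]
      rw [PySem.Dict.get?_insert]
      rcases eq_or_ne c (d.getD 0 ' ') with hc | hc
      · simp [pvLo, hc]
      · have hne : ¬ (d.getD 0 ' ' = c) := fun hh => hc hh.symm
        rw [if_neg hc, hidx c]
        simp only [pvLo, if_neg hne]
    · simp only [pvStepA, hdup, hlen, pvM, hmax]
      rw [hmv0]
      have : pvWsum d 0 0 = 0 + pvVal (d.getD 0 ' ') := by
        rw [pvWsum_cons d (by omega), pvWsum_empty]; ring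
      rw [this]
    · simp only [pvStepA, hdup, hlen, hmv0]
    · simp only [pvStepA, hdup, hlen]
      rw [hmv0, pvWsum_cons d (by omega), pvWsum_empty]
      ring
  | succ e =>
    obtain ⟨hl, hc⟩ := hlc
    simp only at hl hc
    subst hl hc
    set r := e + 1 with hre
    set ch := d.getD r ' ' with hch
    set left := pvMv d n e with hleft
    have hlr : left ≤ r := pvMv_le_top d n e
    have hvleft := pvMv_valid d n e
    -- dup loop result
    have hdup :
        ∃ l1, pvDupLoop d ch idx (d.length + 1) left (pvWsum d left e) =
            (l1, pvWsum d l1 e) ∧ left ≤ l1 ∧ l1 ≤ r ∧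
          (∀ i', l1 ≤ i' → i' ≤ e → d.getD i' ' ' ≠ ch) ∧
          (l1 = left ∨ (0 < l1 ∧ d.getD (l1 - 1) ' ' = ch)) := by
      cases hlo : pvLo d r ch with
      | none =>
        refine ⟨left, pvDupLoop_none (by rw [hidx, hlo]) _ _ _, le_refl _, hlr, ?_, Or.inl rfl⟩
        intro i' _ hi'
        exact pvLo_none hlo i' (by omega)
      | some i =>
        obtain ⟨hik, hieq, hlast⟩ := pvLo_some hlo
        have hie : i ≤ e := by omega
        refine ⟨max left (i + 1),
          pvDupLoop_some (by rw [hidx, hlo]) hie (d.length + 1) left (by omega), ?_, ?_, ?_, ?_⟩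
        · exact Nat.le_max_left _ _
        · exact Nat.max_le.mpr ⟨hlr, by omega⟩
        · intro i' hi1 hi2
          have hgt : i < i' := by
            have := Nat.le_max_right left (i + 1)
            omega
          exact hlast i' (by omega) (by omega)
        · rcases Nat.lt_or_ge left (i + 1) with hcase | hcase
          · right
            rw [Nat.max_eq_right (by omega)]
            exact ⟨by omega, by simpa using hieq⟩
          · left
            exact Nat.max_eq_left (by omega)
    obtain ⟨l1, hdupeq, hl1a, hl1b, hl1no, hl1or⟩ := hdup
    have hlen := pvLenLoop_spec (d := d) hn (hre.symm) (d.length + 1) l1 hl1b (by omega)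
    set l2 := max l1 (r + 1 - n) with hl2
    have hl2a : l1 ≤ l2 := Nat.le_max_left _ _
    have hl2c : r + 1 - n ≤ l2 := Nat.le_max_right _ _
    have hl2r : l2 ≤ r := Nat.max_le.mpr ⟨hl1b, by omega⟩
    -- validity of l2 at r
    have hseg2 : pvSeg d l2 r = pvSeg d l2 e ++ [d.getD r ' '] := pvSeg_snoc d (by omega)
    have hnod2 : (pvSeg d l2 e).Nodup := by
      have := pvValidB_mono hvleft (by omega : left ≤ l2) (by omega)
      exact (pvValidB_iff.mp this).2
    have hnotmem : ch ∉ pvSeg d l2 e := by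
      rw [pvSeg_mem (by omega)]
      rintro ⟨i', hi1, hi2, hi3⟩
      exact hl1no i' (by omega) hi2 hi3
    have hval2 : pvValidB d n r l2 = true := by
      rw [pvValidB_iff]
      refine ⟨by omega, ?_⟩
      rw [hseg2, List.nodup_append]
      refine ⟨hnod2, List.nodup_singleton _, ?_⟩
      intro a ha b hb
      have hb' : b = d.getD r ' ' := by simpa using hb
      rw [hb']
      intro hab
      rw [hab] at ha
      rw [← hch] at ha
      exact hnotmem ha
    have hmin2 : l2 = 0 ∨ pvValidB d n r (l2 - 1) = false := by
      rcases Nat.eq_zero_or_pos l2 with h0 | hpos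
      · exact Or.inl h0
      · right
        rcases Nat.lt_or_ge l1 (r + 1 - n) with hcase | hcase
        · -- pushed by the length cap: window (l2-1, r) too long
          have hl2v : l2 = r + 1 - n := Nat.max_eq_right (by omega)
          have : ¬ (r + 1 - (l2 - 1) ≤ n) := by omega
          simp [pvValidB, this]
        · -- l2 = l1
          have hl2v : l2 = l1 := Nat.max_eq_left hcase
          rcases hl1or with hsame | ⟨hl1pos, hdupc⟩
          · -- l1 = left > 0: minimality of left at e extends to r
            have hl2left : l2 = left := by omega
            have hlpos : 0 < left := by omega
            have hbad := pvMv_min (show left - 1 < pvMv d n e by omega)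
            rw [pvValidB_iff, not_and] at hbad
            rcases Nat.lt_or_ge n (e + 1 - (left - 1)) with hcap | hcap
            · have : ¬ (r + 1 - (l2 - 1) ≤ n) := by omega
              simp [pvValidB, this]
            · have hnn := hbad hcap
              have hsegsplit : pvSeg d (left - 1) r = pvSeg d (left - 1) e ++ [d.getD r ' '] :=
                pvSeg_snoc d (by omega)
              have : ¬ (pvSeg d (left - 1) r).Nodup := by
                rw [hsegsplit]
                intro hcontra
                exact hnn (hcontra.of_append_left)
              have h2 : l2 - 1 = left - 1 := by omega
              rw [h2]
              simp [pvValidB, this]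
          · -- l1 - 1 holds a duplicate of ch
            have hsegc : pvSeg d (l2 - 1) r = d.getD (l2 - 1) ' ' :: pvSeg d (l2 - 1 + 1) r :=
              pvSeg_cons d (by omega)
            have hmem : d.getD (l2 - 1) ' ' ∈ pvSeg d (l2 - 1 + 1) r := by
              rw [pvSeg_mem (by omega)]
              refine ⟨r, by omega, le_refl r, ?_⟩
              rw [hl2v, hdupc]
            have : ¬ (pvSeg d (l2 - 1) r).Nodup := by
              rw [hsegc, List.nodup_cons]
              intro hcontra
              exact hcontra.1 hmem
            simp [pvValidB, this]
    have hmv : pvMv d n r = l2 := pvMv_eq hval2 hmin2 (by omega)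
    -- assemble
    have hcur : pvWsum d l2 e + pvVal (d.getD r ' ') = pvWsum d l2 r := by
      rw [hre, pvWsum_snoc d (by omega : l2 ≤ e + 1)]
    have hdupeq' : pvDupLoop d (d.getD r ' ') idx (d.length + 1) left (pvWsum d left e)
        = (l1, pvWsum d l1 e) := by rw [← hch]; exact hdupeq
    refine ⟨?_, ?_, ?_, ?_⟩
    · intro c
      simp only [pvStepA, hdupeq', hlen]
      rw [PySem.Dict.get?_insert, pvLo]
      rcases eq_or_ne (d.getD r ' ') c with hcc | hcc
      · rw [if_pos hcc.symm, if_pos hcc]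
      · rw [if_neg (fun hh => hcc hh.symm), if_neg hcc, hidx c]
    · simp only [pvStepA, hdupeq', hlen, hmax]
      rw [hcur]
      simp [pvM, hmv]
    · simp only [pvStepA, hdupeq', hlen]
      exact hmv.symm
    · simp only [pvStepA, hdupeq', hlen]
      rw [hcur, hmv]

lemma pvFoldA {d : List Char} {n : Nat} (hn : 1 ≤ n) :
    ∀ k, k ≤ d.length →
      pvInv d n k ((List.range k).foldl (pvStepA d n) (0, 0, 0, PySem.Dict.empty)) := by
  intro k
  induction k with
  | zero =>
    intro _
    refine ⟨fun c => ?_, rfl, rfl, rfl⟩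
    simp [PySem.Dict.get?_empty, pvLo]
  | succ k ih =>
    intro hk
    rw [List.range_succ, List.foldl_append, List.foldl_cons, List.foldl_nil]
    exact pvStep_inv hn (by omega) (ih (by omega))

lemma pvBScan_spec {d : List Char} {n r : Nat} :
    ∀ j, j ≤ r → pvValidB d n r (j + 1) = true →
      ∀ (seen : PySem.Set Char) (tot : Int),
        (∀ c, c ∈ seen ↔ c ∈ pvSeg d (j + 1) r) → tot = pvWsum d (j + 1) r →
        pvBScan d n r j seen tot = pvWsum d (pvMv d n r) r := by
  intro j
  induction j with
  | zero =>
    intro hjr hval seen tot hseen htot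
    rw [pvBScan]
    split
    · rename_i hcond
      have hval0 : pvValidB d n r 0 = true := by
        rw [pvValidB_iff]
        have hnod1 := (pvValidB_iff.mp hval).2
        refine ⟨by omega, ?_⟩
        rw [pvSeg_cons d (by omega), List.nodup_cons]
        exact ⟨fun hm => hcond.2 ((hseen _).mpr hm), hnod1⟩
      have hmv : pvMv d n r = 0 := pvMv_eq hval0 (Or.inl rfl) (by omega)
      rw [hmv, htot, pvWsum_cons d (by omega : 0 ≤ r)]
      ring
    · rename_i hcond
      have hmv : pvMv d n r = 1 := by
        apply pvMv_eq hval _ (by omega)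
        right
        rcases Decidable.not_and_iff_not_or_not.mp hcond with hb | hb
        · simp [pvValidB]
          intro hrn
          exact absurd hrn (by omega)
        · rw [not_not] at hb
          have hmem : d.getD 0 ' ' ∈ pvSeg d 1 r := (hseen _).mp hb
          have : ¬ (pvSeg d 0 r).Nodup := by
            rw [pvSeg_cons d (by omega), List.nodup_cons]
            intro hcontra
            exact hcontra.1 hmem
          simp [pvValidB, this]
      rw [hmv, htot]
  | succ j ih =>
    intro hjr hval seen tot hseen htot
    rw [pvBScan]
    split
    · rename_i hcond
      have hvalj : pvValidB d n r (j + 1) = true := by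
        rw [pvValidB_iff]
        have hnod1 := (pvValidB_iff.mp hval).2
        refine ⟨by omega, ?_⟩
        rw [pvSeg_cons d (by omega), List.nodup_cons]
        exact ⟨fun hm => hcond.2 ((hseen _).mpr hm), hnod1⟩
      refine ih (by omega) hvalj _ _ ?_ ?_
      · intro c
        rw [PySem.Set.mem_add]
        rw [pvSeg_cons d (show j + 1 ≤ r by omega)]
        simp only [List.mem_cons]
        constructor
        · rintro (hm | hm)
          · exact Or.inr ((hseen c).mp hm)
          · exact Or.inl hm
        · rintro (hm | hm)
          · exact Or.inr hm
          · exact Or.inl ((hseen c).mpr hm)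
      · rw [htot, pvWsum_cons d (show j + 1 ≤ r by omega)]
        ring
    · rename_i hcond
      have hmv : pvMv d n r = j + 1 + 1 := by
        apply pvMv_eq hval _ (by omega)
        right
        rcases Decidable.not_and_iff_not_or_not.mp hcond with hb | hb
        · simp [pvValidB]
          intro hrn
          exact absurd hrn (by omega)
        · rw [not_not] at hb
          have hmem : d.getD (j + 1) ' ' ∈ pvSeg d (j + 1 + 1) r := (hseen _).mp hb
          have : ¬ (pvSeg d (j + 1) r).Nodup := by
            rw [pvSeg_cons d (by omega), List.nodup_cons]
            intro hcontra
            exact hcontra.1 hmem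
          simp [pvValidB, this]
      rw [hmv, htot]

lemma pvBScan_top {d : List Char} {n : Nat} (r : Nat) :
    pvBScan d n r r PySem.Set.empty 0 = pvWsum d (pvMv d n r) r := by
  apply pvBScan_spec r (le_refl r) (pvValidB_top d n r)
  · intro c
    simp [PySem.Set.empty, pvSeg_empty]
  · rw [pvWsum_empty]

lemma pvFoldB {d : List Char} {n : Nat} :
    ∀ k, (List.range k).foldl (fun best r => max best (pvBScan d n r r PySem.Set.empty 0)) 0
        = pvM d n k := by
  intro k
  induction k with
  | zero => rfl
  | succ k ih =>
    rw [List.range_succ, List.foldl_append, List.foldl_cons, List.foldl_nil, ih,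
      pvBScan_top k]
    rfl

-- ===== VERDICT (by name: the statement is the Claim_ definition above) =====
theorem max_cyclic_substring_sum_spec : Claim_equal_max_cyclic_substring_sum := by
  intro s _
  unfold Spec_max_cyclic_substring_sum
  unfold max_cyclic_substring_sum max_cyclic_substring_sum_alt
  rcases List.eq_nil_or_concat s.toList with hnil | ⟨_, _, hcons⟩
  · simp [hnil]
  · have hn : 1 ≤ s.toList.length := by
      rw [hcons]; simp
    have hA := pvFoldA (d := s.toList ++ s.toList) hn (s.toList ++ s.toList).length (le_refl _)
    have hB := pvFoldB (d := s.toList ++ s.toList) (n := s.toList.length) (s.toList ++ s.toList).length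
    simp only [hB]
    exact hA.2.1
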